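-- pv_equiv track=rewrite | github.com/DenilsenAxel/Smort-PRS | src/Utility_13519059.py | createCourseDict
-- ===== SOURCE A (Python) =====
-- def createCourseDict(lineArr):
--     # Fungsi untuk membuat dictionary mata kuliah beserta list mata kuliah pre-requisitenya
--     # Menerima input list of strings dimana tiap elemen list merupakan baris dalam input file .txt
--
--     courseDict = {}
--
--     # Looping di setiap baris
--     for line in lineArr:
--         courseCount = 0
--         courseID = ""
--         currCourse = ""
--         currPrerequisite = []
--         i = 0
--
--         # Parsing string menjadi dictionary mata kuliah
--         for i in range(len(line)):
--             if(line[i] == ',' or line[i] == '.'):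
--                 if(courseCount > 0):
--                     currPrerequisite.append(courseID)
--                 else:
--                     currCourse = courseID
--                 courseID = ""
--                 courseCount += 1
--             elif(line[i] != ' '):
--                 courseID += line[i]
--             i += 1
--
--         courseDict.update({currCourse: currPrerequisite})
--
--     return courseDict
-- ===== SOURCE B (Python) =====
-- def createCourseDict(lineArr):
--     courseDict = {}
--     for line in lineArr:
--         parts = line.replace(' ', '').replace('.', ',').split(',')
--         committed = parts[:-1]
--         course = committed[0] if committed else ""
--         courseDict[course] = committed[1:]
--     return courseDict
-- ===== Notes on version B (the rewrite author's own statement) =====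
-- stated objective: simpler
-- what changed: Replaced A's character-by-character state-machine scan (courseCount/courseID accumulators) per line with replace(' ','') + split on delimiters and a drop-last slice, taking head and tail of the committed tokens.
import Mathlib
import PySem

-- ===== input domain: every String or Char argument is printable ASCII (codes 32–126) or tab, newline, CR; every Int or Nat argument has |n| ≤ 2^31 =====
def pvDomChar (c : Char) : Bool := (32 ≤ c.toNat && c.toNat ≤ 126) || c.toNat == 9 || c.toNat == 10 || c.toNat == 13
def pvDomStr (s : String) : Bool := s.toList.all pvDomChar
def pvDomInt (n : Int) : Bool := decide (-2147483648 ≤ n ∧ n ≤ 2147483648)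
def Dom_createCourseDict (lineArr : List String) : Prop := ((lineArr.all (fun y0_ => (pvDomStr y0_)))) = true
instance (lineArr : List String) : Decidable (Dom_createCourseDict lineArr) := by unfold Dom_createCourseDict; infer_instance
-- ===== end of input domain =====

-- B replaces A's char-by-char scanner with replace(' ','') + split on delimiters and a drop-last slice (simpler); return-value equivalence proved on all inputs.


-- ===== PORT A =====
-- state = (courseCount, courseID, currCourse, currPrerequisite); A's inner loop visits line[i] for each i in order
def courseStep (st : Nat × List Char × List Char × List (List Char)) (c : Char) :
    Nat × List Char × List Char × List (List Char) :=
  if c = ',' ∨ c = '.' then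
    if st.1 > 0 then (st.1 + 1, [], st.2.2.1, st.2.2.2 ++ [st.2.1])
    else (st.1 + 1, [], st.2.1, st.2.2.2)
  else if c ≠ ' ' then (st.1, st.2.1 ++ [c], st.2.2.1, st.2.2.2)
  else st

def createCourseDict (lineArr : List String) : List (String × List String) :=
  (lineArr.foldl (fun courseDict line =>
      let st := line.toList.foldl courseStep (0, [], [], [])
      courseDict.insert (String.ofList st.2.2.1) (st.2.2.2.map String.ofList))
    (PySem.Dict.mk ([] : List (String × List String)))).items

-- ===== PORT B =====
def createCourseDict_alt (lineArr : List String) : List (String × List String) :=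
  (lineArr.foldl (fun courseDict line =>
      let parts := PySem.Chars.splitOn
        (PySem.Chars.replace (PySem.Chars.replace line.toList [' '] []) ['.'] [',']) [',']
      let committed := parts.dropLast
      courseDict.insert (String.ofList (committed.headD []))
        (committed.tail.map String.ofList))
    (PySem.Dict.mk ([] : List (String × List String)))).items

-- ===== PRECONDITION & SPEC =====
def Spec_createCourseDict (lineArr : List String) (out : List (String × List String)) : Prop := out = createCourseDict_alt lineArr
instance (lineArr : List String) (out : List (String × List String)) : Decidable (Spec_createCourseDict lineArr out) := by unfold Spec_createCourseDict; infer_instance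

-- ===== CLAIM (what is proved, stated in full; the proofs are below) =====
def Claim_equal_createCourseDict : Prop := ∀ (lineArr : List String), Dom_createCourseDict lineArr → Spec_createCourseDict lineArr (createCourseDict lineArr)

-- ===== LEMMAS AND PROOFS =====

/-- prepend `p` to the first token of a token list -/
def pvConsHead (p : List Char) : List (List Char) → List (List Char)
  | [] => [p]
  | t :: ts => (p ++ t) :: ts

/-- tokens of a raw line: spaces dropped, split at ',' and '.' (trailing segment included) -/
def pvTok : List Char → List (List Char)
  | [] => [[]]
  | c :: cs =>
    if c = ' ' then pvTok cs
    else if c = ',' ∨ c = '.' then [] :: pvTok cs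
    else pvConsHead [c] (pvTok cs)

/-- tokens with ',' as the only delimiter -/
def pvTokC : List Char → List (List Char)
  | [] => [[]]
  | c :: cs => if c = ',' then [] :: pvTokC cs else pvConsHead [c] (pvTokC cs)

theorem pvConsHead_ne_nil (p : List Char) (ts : List (List Char)) : pvConsHead p ts ≠ [] := by
  cases ts <;> simp [pvConsHead]

theorem pvTok_ne_nil (cs : List Char) : pvTok cs ≠ [] := by
  induction cs with
  | nil => simp [pvTok]
  | cons c cs ih => simp only [pvTok]; split_ifs <;> simp [ih, pvConsHead_ne_nil]

theorem pvTokC_ne_nil (cs : List Char) : pvTokC cs ≠ [] := by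
  induction cs with
  | nil => simp [pvTokC]
  | cons c cs ih => simp only [pvTokC]; split_ifs <;> simp [pvConsHead_ne_nil]

theorem pvConsHead_nil (ts : List (List Char)) (h : ts ≠ []) : pvConsHead [] ts = ts := by
  cases ts with
  | nil => exact absurd rfl h
  | cons t ts => simp [pvConsHead]

theorem pvConsHead_cons (p t : List Char) (ts : List (List Char)) :
    pvConsHead p (t :: ts) = (p ++ t) :: ts := rfl

theorem pvConsHead_consHead (p q : List Char) (ts : List (List Char)) :
    pvConsHead p (pvConsHead q ts) = pvConsHead (p ++ q) ts := by
  cases ts <;> simp [pvConsHead]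

theorem pvGetLastD_of_ne_nil {α : Type} (l : List α) (d d' : α) (h : l ≠ []) :
    l.getLastD d = l.getLastD d' := by
  rw [List.getLastD_eq_getLast?, List.getLastD_eq_getLast?,
      List.getLast?_eq_some_getLast h]
  rfl

/-- replace with a single-char pattern is flatMap -/
theorem pvReplace_go (a : Char) (new : List Char) :
    ∀ (fuel : Nat) (l acc : List Char), l.length ≤ fuel →
      PySem.Chars.replace.go [a] new fuel l acc =
        acc.reverse ++ l.flatMap (fun c => if c = a then new else [c]) := by
  intro fuel
  induction fuel with
  | zero =>
    intro l acc h
    have : l = [] := by cases l <;> simp_all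
    subst this; simp [PySem.Chars.replace.go]
  | succ n ih =>
    intro l acc h
    cases l with
    | nil => simp [PySem.Chars.replace.go]
    | cons c t =>
      simp only [PySem.Chars.replace.go]
      by_cases hc : c = a
      · rw [if_pos (by simp [List.isPrefixOf, hc])]
        rw [ih _ _ (by simpa using Nat.le_of_succ_le_succ h)]
        simp [hc]
      · have hbc : (a == c) = false := beq_eq_false_iff_ne.mpr (fun h' => hc h'.symm)
        rw [if_neg (by simp [List.isPrefixOf, hbc])]
        rw [ih _ _ (by simpa using Nat.le_of_succ_le_succ h)]
        simp [hc]

theorem pvReplace_eq (a : Char) (new cs : List Char) :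
    PySem.Chars.replace cs [a] new = cs.flatMap (fun c => if c = a then new else [c]) := by
  rw [PySem.Chars.replace, if_neg (by simp)]
  exact pvReplace_go a new cs.length cs [] (Nat.le_refl _)

/-- splitOn.go with sep "," computes the comma tokens -/
theorem pvSplitOn_go :
    ∀ (fuel : Nat) (l cur : List Char) (acc : List (List Char)), l.length < fuel →
      PySem.Chars.splitOn.go [','] fuel l cur acc =
        acc.reverse ++ pvConsHead cur.reverse (pvTokC l) := by
  intro fuel
  induction fuel with
  | zero => intro l cur acc h; omega
  | succ n ih =>
    intro l cur acc h
    cases l with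
    | nil => simp [PySem.Chars.splitOn.go, pvTokC, pvConsHead]
    | cons c t =>
      simp only [PySem.Chars.splitOn.go]
      by_cases hc : c = ','
      · rw [if_pos (by simp [List.isPrefixOf, hc])]
        rw [ih _ _ _ (by simpa using Nat.lt_of_succ_lt_succ h)]
        have htk : pvTokC (c :: t) = [] :: pvTokC t := by simp [pvTokC, hc]
        have h1 : List.drop [','].length (c :: t) = t := by simp
        rw [h1, List.reverse_nil, pvConsHead_nil _ (pvTokC_ne_nil t), htk, pvConsHead_cons]
        simp
      · have hbc : ((',' : Char) == c) = false := beq_eq_false_iff_ne.mpr (fun h' => hc h'.symm)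
        rw [if_neg (by simp [List.isPrefixOf, hbc])]
        rw [ih _ _ _ (by simpa using Nat.lt_of_succ_lt_succ h)]
        have htk : pvTokC (c :: t) = pvConsHead [c] (pvTokC t) := by simp [pvTokC, hc]
        rw [htk, pvConsHead_consHead]
        simp

theorem pvSplitOn_eq (cs : List Char) :
    PySem.Chars.splitOn cs [','] = pvTokC cs := by
  rw [PySem.Chars.splitOn, pvSplitOn_go _ _ _ _ (Nat.lt_succ_self _)]
  simp [pvConsHead_nil _ (pvTokC_ne_nil cs)]

/-- comma-tokens of the cleaned line = pvTok of the raw line -/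
theorem pvTokC_clean (cs : List Char) :
    pvTokC ((PySem.Chars.replace (PySem.Chars.replace cs [' '] []) ['.'] [','])) = pvTok cs := by
  rw [pvReplace_eq, pvReplace_eq, List.flatMap_assoc]
  induction cs with
  | nil => simp [pvTokC, pvTok]
  | cons c cs ih =>
    by_cases hs : c = ' '
    · simp [hs, pvTok, ih]
    · by_cases hd : c = ',' ∨ c = '.'
      · rcases hd with hd | hd <;> simp [hd, pvTok, pvTokC, ih]
      · rw [not_or] at hd
        simp [hs, hd.1, hd.2, pvTok, pvTokC, ih]

/-- A's inner loop, generalized over already-committed tokens -/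
theorem pvCourseLoop (cs : List Char) :
    ∀ (toks : List (List Char)) (pend : List Char),
      List.foldl courseStep (toks.length, pend, toks.headD [], toks.tail) cs =
        ((toks ++ (pvConsHead pend (pvTok cs)).dropLast).length,
         (pvConsHead pend (pvTok cs)).getLastD [],
         (toks ++ (pvConsHead pend (pvTok cs)).dropLast).headD [],
         (toks ++ (pvConsHead pend (pvTok cs)).dropLast).tail) := by
  induction cs with
  | nil => intro toks pend; cases toks <;> simp [pvTok, pvConsHead]
  | cons c cs ih =>
    intro toks pend
    by_cases hs : c = ' '
    · have hstep : courseStep (toks.length, pend, toks.headD [], toks.tail) c =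
          (toks.length, pend, toks.headD [], toks.tail) := by
        simp [courseStep, hs]
      rw [List.foldl_cons, hstep, ih toks pend]
      simp [pvTok, hs]
    · by_cases hd : c = ',' ∨ c = '.'
      · have hstep : courseStep (toks.length, pend, toks.headD [], toks.tail) c =
            ((toks ++ [pend]).length, [], (toks ++ [pend]).headD [], (toks ++ [pend]).tail) := by
          cases toks <;> simp [courseStep, hd]
        rw [List.foldl_cons, hstep, ih (toks ++ [pend]) []]
        have htok : pvTok (c :: cs) = [] :: pvTok cs := by
          simp [pvTok, hs, hd]
        rw [htok]
        have h1 : pvConsHead pend ([] :: pvTok cs) = pend :: pvTok cs := by simp [pvConsHead]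
        rw [h1, pvConsHead_nil _ (pvTok_ne_nil cs),
            List.dropLast_cons_of_ne_nil (pvTok_ne_nil cs)]
        rw [Prod.ext_iff, Prod.ext_iff, Prod.ext_iff]
        refine ⟨by simp, ?_, by simp, by simp⟩
        show (pvTok cs).getLastD [] = (pend :: pvTok cs).getLastD []
        rw [List.getLastD_cons]
        exact pvGetLastD_of_ne_nil _ _ _ (pvTok_ne_nil cs)
      · have hstep : courseStep (toks.length, pend, toks.headD [], toks.tail) c =
            (toks.length, pend ++ [c], toks.headD [], toks.tail) := by
          simp [courseStep, hs, hd]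
        rw [List.foldl_cons, hstep, ih toks (pend ++ [c])]
        have htok : pvTok (c :: cs) = pvConsHead [c] (pvTok cs) := by
          simp [pvTok, hs, hd]
        rw [htok, pvConsHead_consHead]

/-- the two per-line step functions agree -/
theorem pvStep_eq (d : PySem.Dict String (List String)) (line : String) :
    (let st := line.toList.foldl courseStep (0, [], [], [])
     d.insert (String.ofList st.2.2.1) (st.2.2.2.map String.ofList)) =
    (let parts := PySem.Chars.splitOn
        (PySem.Chars.replace (PySem.Chars.replace line.toList [' '] []) ['.'] [',']) [',']
     let committed := parts.dropLast
     d.insert (String.ofList (committed.headD []))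
       (committed.tail.map String.ofList)) := by
  have hA := pvCourseLoop line.toList [] []
  simp only [List.length_nil, List.headD_nil, List.tail_nil] at hA
  rw [pvConsHead_nil _ (pvTok_ne_nil _)] at hA
  simp only [hA, List.nil_append]
  rw [pvSplitOn_eq, pvTokC_clean]

-- ===== VERDICT (by name: the statement is the Claim_ definition above) =====
theorem createCourseDict_spec : Claim_equal_createCourseDict := by
  intro lineArr _
  unfold Spec_createCourseDict createCourseDict createCourseDict_alt
  congr 1
  exact List.foldl_ext _ _ _ (fun d line _ => pvStep_eq d line)
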